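-- pv_equiv track=rewrite | github.com/ShunsukeMatsuno/TeX-Template | fonts/generate-fallbacks.py | group_consecutive_codepoints
-- ===== SOURCE A (Python) =====
-- from typing import List, Dict, Set, Tuple, Optional, Any
--
-- def group_consecutive_codepoints(codepoints: Set[int]) -> List[str]:
--     """Groups sorted codepoints into ranges for the unicode-math 'range' option,
--        adding required double quotes around each item (e.g., "XXXX" or "XXXX-"YYYY")."""
--     if not codepoints:
--         return []
--     sorted_codes = sorted(list(codepoints))
--     ranges: List[str] = []
--     if not sorted_codes:
--         return []
--     start_range = sorted_codes[0]
--     end_range = sorted_codes[0]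
--     for i in range(1, len(sorted_codes)):
--         if sorted_codes[i] == end_range + 1:
--             end_range = sorted_codes[i]
--         else:
--             if start_range == end_range:
--                 # Format single codepoint correctly (pad to at least 4 hex digits)
--                 ranges.append(f'"{start_range:04X}')
--             else:
--                 # Format range correctly (pad to at least 4 hex digits)
--                 ranges.append(f'"{start_range:04X}-"{end_range:04X}')
--             start_range = sorted_codes[i]
--             end_range = sorted_codes[i]
--     # Append the last range
--     if start_range == end_range:
--         ranges.append(f'"{start_range:04X}')
--     else:
--         ranges.append(f'"{start_range:04X}-"{end_range:04X}')
--     return ranges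
-- ===== SOURCE B (Python) =====
-- from typing import List, Set
--
-- def group_consecutive_codepoints(codepoints: Set[int]) -> List[str]:
--     """Membership-based run detection: a codepoint c starts a run iff c-1 is not in
--        the set; walk forward through the set to find the run's end, then format."""
--     s = set(codepoints)
--     out: List[str] = []
--     for c in sorted(s):
--         if c - 1 not in s:
--             e = c
--             while e + 1 in s:
--                 e += 1
--             out.append(f'"{c:04X}' if c == e else f'"{c:04X}-"{e:04X}')
--     return out
-- ===== Notes on version B (the rewrite author's own statement) =====
-- stated objective: alternative
-- what changed: Replaces A's stateful start/end adjacency scan over the sorted list by set-membership run detection: a codepoint c starts a run iff c-1 is not in the set, and the run's end is found by walking e+1, e+2, ... through the set (the classic hash-set consecutive-sequence technique); no adjacent-element comparison of the sorted sequence is made. Pre_ restricts to duplicate-free lists, i.e. the declared Set[int] parameter type.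
import Mathlib
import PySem

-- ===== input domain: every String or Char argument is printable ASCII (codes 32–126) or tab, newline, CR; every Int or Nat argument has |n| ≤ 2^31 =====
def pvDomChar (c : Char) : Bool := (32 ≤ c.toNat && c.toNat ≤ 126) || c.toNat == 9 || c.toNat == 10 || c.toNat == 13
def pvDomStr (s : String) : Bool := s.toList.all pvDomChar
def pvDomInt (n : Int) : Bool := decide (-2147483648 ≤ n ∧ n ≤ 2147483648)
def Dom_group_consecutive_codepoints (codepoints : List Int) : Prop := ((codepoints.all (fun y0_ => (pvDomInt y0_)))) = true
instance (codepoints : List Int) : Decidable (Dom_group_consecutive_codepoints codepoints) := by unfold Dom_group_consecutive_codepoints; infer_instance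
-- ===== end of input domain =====

-- B replaces A's stateful start/end adjacency scan with set-membership run detection
-- (c starts a run iff c-1 ∉ set; walk e+1, e+2, … to find the end). Objective: alternative; same cost.

-- ===== PORT A =====
-- shared helper: Python's f'{n:04X}' (upper hex, zero-padded to total width 4, sign included in the width)
def pvHexDigit (d : Nat) : Char :=
  if d = 0 then '0' else if d = 1 then '1' else if d = 2 then '2' else if d = 3 then '3'
  else if d = 4 then '4' else if d = 5 then '5' else if d = 6 then '6' else if d = 7 then '7'
  else if d = 8 then '8' else if d = 9 then '9' else if d = 10 then 'A' else if d = 11 then 'B'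
  else if d = 12 then 'C' else if d = 13 then 'D' else if d = 14 then 'E' else 'F'

def pvHexNat : Nat → List Char
  | 0 => []
  | n + 1 => pvHexNat ((n + 1) / 16) ++ [pvHexDigit ((n + 1) % 16)]
decreasing_by exact Nat.div_lt_self (Nat.succ_pos n) (by omega)

def pvHexPad (w : Nat) (l : List Char) : List Char :=
  List.replicate (w - l.length) '0' ++ l

def pvHex04 (n : Int) : String :=
  if n < 0 then String.ofList ('-' :: pvHexPad 3 (pvHexNat n.natAbs))
  else String.ofList (pvHexPad 4 (if n.natAbs = 0 then ['0'] else pvHexNat n.natAbs))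

def group_consecutive_codepoints (codepoints : List Int) : List String :=
  if codepoints = [] then []
  else
    match PySem.List.sorted codepoints (fun x => x) false with
    | [] => []
    | c :: rest =>
      -- for i in range(1, len(sorted_codes)) visits sorted_codes[1:], i.e. rest
      let st := rest.foldl
        (fun (acc : List String × Int × Int) x =>
          let (ranges, start_range, end_range) := acc
          if x = end_range + 1 then (ranges, start_range, x)
          else if start_range = end_range then
            (ranges ++ ["\"" ++ pvHex04 start_range], x, x)
          else
            (ranges ++ ["\"" ++ pvHex04 start_range ++ "-\"" ++ pvHex04 end_range], x, x))
        ([], c, c)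
      if st.2.1 = st.2.2 then st.1 ++ ["\"" ++ pvHex04 st.2.1]
      else st.1 ++ ["\"" ++ pvHex04 st.2.1 ++ "-\"" ++ pvHex04 st.2.2]

-- ===== PORT B =====
-- the 'while e + 1 in s: e += 1' loop; fuel = len(s) suffices (the visited values are
-- distinct members of s, and s also contains the start, so at most len(s) - 1 steps succeed)
def pvWalk (s : List Int) (e : Int) : Nat → Int
  | 0 => e
  | fuel + 1 => if (e + 1) ∈ s then pvWalk s (e + 1) fuel else e

def group_consecutive_codepoints_alt (codepoints : List Int) : List String :=
  let s : PySem.Set Int := PySem.Set.ofList codepoints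
  (PySem.List.sorted s (fun x => x) false).filterMap (fun c =>
    if (c - 1) ∈ s then none
    else
      let e := pvWalk s c s.length
      some (if c = e then "\"" ++ pvHex04 c else "\"" ++ pvHex04 c ++ "-\"" ++ pvHex04 e))

-- ===== PRECONDITION & SPEC =====
-- Pre_ excludes lists with duplicate elements: the parameter is declared Set[int], and on a
-- duplicate-carrying list A emits an extra per-duplicate item while B's set() collapses them —
-- an unspecified corner outside the declared type where either behaviour is defensible.
def Pre_group_consecutive_codepoints (codepoints : List Int) : Prop := codepoints.Nodup
instance (codepoints : List Int) : Decidable (Pre_group_consecutive_codepoints codepoints) := by unfold Pre_group_consecutive_codepoints; infer_instance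

def pvWitness_group_consecutive_codepoints : List Int := [5, 6, 10]

def Spec_group_consecutive_codepoints (codepoints : List Int) (out : List String) : Prop := out = group_consecutive_codepoints_alt codepoints
instance (codepoints : List Int) (out : List String) : Decidable (Spec_group_consecutive_codepoints codepoints out) := by unfold Spec_group_consecutive_codepoints; infer_instance

-- ===== CLAIM (what is proved, stated in full; the proofs are below) =====
def Claim_equal_group_consecutive_codepoints : Prop := ∀ (codepoints : List Int), Dom_group_consecutive_codepoints codepoints → Pre_group_consecutive_codepoints codepoints → Spec_group_consecutive_codepoints codepoints (group_consecutive_codepoints codepoints)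

-- ===== LEMMAS AND PROOFS =====

-- reference decomposition: the (start, end) pairs of the maximal runs of the sorted tail
def pvChunks (s e : Int) : List Int → List (Int × Int)
  | [] => [(s, e)]
  | x :: xs => if x = e + 1 then pvChunks s x xs else (s, e) :: pvChunks x x xs

def pvFmtP (p : Int × Int) : String :=
  if p.1 = p.2 then "\"" ++ pvHex04 p.1 else "\"" ++ pvHex04 p.1 ++ "-\"" ++ pvHex04 p.2

-- A's loop body and final append, named so the proof can rewrite them
def pvStep : (List String × Int × Int) → Int → (List String × Int × Int) :=
  fun (acc : List String × Int × Int) x =>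
    let (ranges, start_range, end_range) := acc
    if x = end_range + 1 then (ranges, start_range, x)
    else if start_range = end_range then
      (ranges ++ ["\"" ++ pvHex04 start_range], x, x)
    else
      (ranges ++ ["\"" ++ pvHex04 start_range ++ "-\"" ++ pvHex04 end_range], x, x)

def pvFinish (st : List String × Int × Int) : List String :=
  if st.2.1 = st.2.2 then st.1 ++ ["\"" ++ pvHex04 st.2.1]
  else st.1 ++ ["\"" ++ pvHex04 st.2.1 ++ "-\"" ++ pvHex04 st.2.2]

-- A's fold-then-final-append equals formatting the chunks
theorem pvA_loop (xs : List Int) : ∀ (ranges : List String) (s e : Int),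
    pvFinish (xs.foldl pvStep (ranges, s, e)) = ranges ++ (pvChunks s e xs).map pvFmtP := by
  induction xs with
  | nil =>
    intro ranges s e
    simp only [List.foldl_nil, pvFinish, pvChunks, List.map, pvFmtP]
    split_ifs <;> simp_all
  | cons x xs ih =>
    intro ranges s e
    rw [List.foldl_cons]
    have hstep : pvStep (ranges, s, e) x =
        if x = e + 1 then (ranges, s, x)
        else if s = e then (ranges ++ ["\"" ++ pvHex04 s], x, x)
        else (ranges ++ ["\"" ++ pvHex04 s ++ "-\"" ++ pvHex04 e], x, x) := rfl
    rw [hstep]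
    by_cases hx : x = e + 1
    · rw [if_pos hx, ih, pvChunks, if_pos hx]
    · rw [if_neg hx, pvChunks, if_neg hx, List.map_cons]
      by_cases hse : s = e
      · rw [if_pos hse, ih, List.append_assoc]
        simp [pvFmtP, hse]
      · rw [if_neg hse, ih, List.append_assoc]
        simp [pvFmtP, hse]

-- end of the run starting at e, read from the sorted tail
def pvRunEnd (e : Int) : List Int → Int
  | [] => e
  | x :: xs => if x = e + 1 then pvRunEnd x xs else e

-- chunks after the current one, read from the sorted tail
def pvChunksRest (e : Int) : List Int → List (Int × Int)
  | [] => []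
  | x :: xs => if x = e + 1 then pvChunksRest x xs else pvChunks x x xs

theorem pvChunks_decomp (xs : List Int) : ∀ s e,
    pvChunks s e xs = (s, pvRunEnd e xs) :: pvChunksRest e xs := by
  induction xs with
  | nil => intro s e; rfl
  | cons x xs ih =>
    intro s e
    simp only [pvChunks, pvRunEnd, pvChunksRest]
    by_cases hx : x = e + 1
    · rw [if_pos hx, if_pos hx, if_pos hx, ih]
    · rw [if_neg hx, if_neg hx, if_neg hx]

-- in a strictly increasing list, everything above e lies in the tail after e
theorem pvMemGt (S p rest : List Int) (e : Int) (hS : S.Pairwise (· < ·))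
    (hd : S = p ++ e :: rest) : ∀ y ∈ S, e < y → y ∈ rest := by
  subst hd
  rw [List.pairwise_append] at hS
  intro y hy hey
  rcases List.mem_append.1 hy with hyp | hyr
  · exact absurd (hS.2.2 y hyp e (List.mem_cons_self)) (by omega)
  · rcases List.mem_cons.1 hyr with h | h
    · omega
    · exact h

theorem pvRunEnd_props (S : List Int) (hS : S.Pairwise (· < ·)) :
    ∀ (rest p : List Int) (e : Int), S = p ++ e :: rest →
      e ≤ pvRunEnd e rest ∧
      (∀ k : Int, e < k → k ≤ pvRunEnd e rest → k ∈ rest) ∧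
      (pvRunEnd e rest + 1) ∉ S := by
  intro rest
  induction rest with
  | nil =>
    intro p e hd
    refine ⟨le_refl _, fun k h1 h2 => absurd (lt_of_lt_of_le h1 h2) (lt_irrefl _), ?_⟩
    intro hmem
    have := pvMemGt S p [] e hS hd (e + 1) hmem (by omega)
    simp at this
  | cons x xs ih =>
    intro p e hd
    by_cases hx : x = e + 1
    · have hd' : S = (p ++ [e]) ++ x :: xs := by simp [hd]
      obtain ⟨h1, h2, h3⟩ := ih (p ++ [e]) x hd'
      simp only [pvRunEnd, if_pos hx]
      refine ⟨by omega, ?_, h3⟩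
      intro k hk1 hk2
      by_cases hkx : k = x
      · exact hkx ▸ List.mem_cons_self
      · exact List.mem_cons_of_mem _ (h2 k (by omega) hk2)
    · simp only [pvRunEnd, if_neg hx]
      refine ⟨le_refl _, fun k h1 h2 => absurd (lt_of_lt_of_le h1 h2) (lt_irrefl _), ?_⟩
      intro hmem
      have hin := pvMemGt S p (x :: xs) e hS hd (e + 1) hmem (by omega)
      -- facts from pairwise: e < x and x < every member of xs
      have hpw : (e :: x :: xs).Pairwise (· < ·) := by
        rw [hd, List.pairwise_append] at hS; exact hS.2.1
      have hex : e < x := (List.pairwise_cons.1 hpw).1 x List.mem_cons_self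
      have hxs : ∀ y ∈ xs, x < y :=
        (List.pairwise_cons.1 (List.pairwise_cons.1 hpw).2).1
      rcases List.mem_cons.1 hin with h | h
      · exact hx h.symm
      · have := hxs _ h; omega

-- the while-loop: walking from a over the members of m reaches b
theorem pvWalk_spec (m : List Int) : ∀ (fuel : Nat) (a b : Int), a ≤ b →
    (∀ k : Int, a < k → k ≤ b → k ∈ m) → (b + 1) ∉ m → (b - a).toNat < fuel →
    pvWalk m a fuel = b := by
  intro fuel
  induction fuel with
  | zero => intro a b _ _ _ h; omega
  | succ f ih =>
    intro a b hab hall hnb hfuel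
    simp only [pvWalk]
    by_cases hab' : a = b
    · subst hab'
      rw [if_neg hnb]
    · have hmem : (a + 1) ∈ m := hall (a + 1) (by omega) (by omega)
      rw [if_pos hmem]
      exact ih (a + 1) b (by omega) (fun k h1 h2 => hall k (by omega) h2) hnb (by omega)

-- fuel bound: the run from c to b consists of distinct members of S
theorem pvCardBound (S : List Int) (c b : Int) (hc : c ∈ S) (hcb : c ≤ b)
    (hall : ∀ k : Int, c < k → k ≤ b → k ∈ S) : (b - c).toNat < S.length := by
  have hsub : Finset.Icc c b ⊆ S.toFinset := by
    intro k hk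
    rw [Finset.mem_Icc] at hk
    rw [List.mem_toFinset]
    by_cases hkc : k = c
    · exact hkc ▸ hc
    · exact hall k (by omega) hk.2
  have h1 := Finset.card_le_card hsub
  rw [Int.card_Icc] at h1
  have h2 := S.toFinset_card_le
  omega

-- B's filter-and-walk over the sorted tail produces exactly the later chunks
theorem pvB_tail (S m : List Int) (hS : S.Pairwise (· < ·))
    (hm : ∀ y : Int, y ∈ m ↔ y ∈ S) (hlen : m.length = S.length) :
    ∀ (rest p : List Int) (e : Int), S = p ++ e :: rest →
      (rest.filterMap (fun c =>
        if (c - 1) ∈ m then none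
        else
          let e := pvWalk m c m.length
          some (if c = e then "\"" ++ pvHex04 c else "\"" ++ pvHex04 c ++ "-\"" ++ pvHex04 e)))
      = (pvChunksRest e rest).map pvFmtP := by
  intro rest
  induction rest with
  | nil => intro p e _; rfl
  | cons x xs ih =>
    intro p e hd
    have hd' : S = (p ++ [e]) ++ x :: xs := by simp [hd]
    have hpw : (e :: x :: xs).Pairwise (· < ·) := by
      rw [hd, List.pairwise_append] at hS; exact hS.2.1
    have hex : e < x := (List.pairwise_cons.1 hpw).1 x List.mem_cons_self
    rw [List.filterMap_cons]
    by_cases hx : x = e + 1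
    · have hxm : (x - 1) ∈ m := by
        rw [hm, hd]
        exact List.mem_append.2 (Or.inr (by simp [hx]))
      rw [if_pos hxm]
      simp only [pvChunksRest, if_pos hx]
      exact ih (p ++ [e]) x hd'
    · have hxnm : (x - 1) ∉ m := by
        rw [hm]
        intro hmem
        have hgt : e < x - 1 := by omega
        have := pvMemGt S p (x :: xs) e hS hd (x - 1) hmem hgt
        rcases List.mem_cons.1 this with h | h
        · omega
        · have hxs : ∀ y ∈ xs, x < y :=
            (List.pairwise_cons.1 (List.pairwise_cons.1 hpw).2).1
          have := hxs _ h; omega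
      rw [if_neg hxnm]
      obtain ⟨h1, h2, h3⟩ := pvRunEnd_props S hS xs (p ++ [e]) x hd'
      have hxS : x ∈ S := by rw [hd]; simp
      have hallS : ∀ k : Int, x < k → k ≤ pvRunEnd x xs → k ∈ S := by
        intro k hk1 hk2
        rw [hd]
        exact List.mem_append.2 (Or.inr (List.mem_cons_of_mem _ (List.mem_cons_of_mem _ (h2 k hk1 hk2))))
      have hw : pvWalk m x m.length = pvRunEnd x xs := by
        refine pvWalk_spec m m.length x (pvRunEnd x xs) h1
          (fun k hk1 hk2 => (hm k).2 (hallS k hk1 hk2)) (fun h => h3 ((hm _).1 h)) ?_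
        rw [hlen]
        exact pvCardBound S x (pvRunEnd x xs) hxS h1 hallS
      simp only [pvChunksRest, if_neg hx, pvChunks_decomp, List.map_cons]
      rw [ih (p ++ [e]) x hd', hw]
      rfl

-- ===== VERDICT (by name: the statement is the Claim_ definition above) =====
theorem group_consecutive_codepoints_spec : Claim_equal_group_consecutive_codepoints := by
  intro codepoints _ hnd
  unfold Spec_group_consecutive_codepoints group_consecutive_codepoints group_consecutive_codepoints_alt
  have hof : PySem.Set.ofList codepoints = codepoints :=
    PySem.Set.ofList_eq_self_of_nodup codepoints hnd
  have hS : (PySem.List.sorted (PySem.Set.ofList codepoints) (fun x => x) false).Pairwise (· < ·) :=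
    PySem.List.sorted_ofList_pairwise_lt codepoints
  rw [hof] at hS
  simp only [hof]
  by_cases hnil : codepoints = []
  · subst hnil; rfl
  · rw [if_neg hnil]
    have hm : ∀ y : Int, y ∈ codepoints ↔ y ∈ PySem.List.sorted codepoints (fun x => x) false :=
      fun y => (PySem.List.mem_sorted codepoints (fun x => x) false y).symm
    have hlen : codepoints.length = (PySem.List.sorted codepoints (fun x => x) false).length :=
      (PySem.List.length_sorted codepoints (fun x => x) false).symm
    rcases hs : PySem.List.sorted codepoints (fun x => x) false with _ | ⟨c, rest⟩
    · simp
    · rw [hs] at hS hm hlen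
      have hcm : (c - 1) ∉ codepoints := by
        rw [hm]
        intro hmem
        rcases List.mem_cons.1 hmem with h | h
        · omega
        · have := (List.pairwise_cons.1 hS).1 _ h; omega
      obtain ⟨h1, h2, h3⟩ := pvRunEnd_props (c :: rest) hS rest [] c rfl
      have hallS : ∀ k : Int, c < k → k ≤ pvRunEnd c rest → k ∈ c :: rest :=
        fun k hk1 hk2 => List.mem_cons_of_mem _ (h2 k hk1 hk2)
      have hw : pvWalk codepoints c codepoints.length = pvRunEnd c rest := by
        refine pvWalk_spec codepoints codepoints.length c (pvRunEnd c rest) h1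
          (fun k hk1 hk2 => (hm k).2 (hallS k hk1 hk2)) (fun h => h3 ((hm _).1 h)) ?_
        rw [hlen]
        exact pvCardBound (c :: rest) c (pvRunEnd c rest) List.mem_cons_self h1 hallS
      refine Eq.trans (pvA_loop rest [] c c) ?_
      rw [List.nil_append, pvChunks_decomp, List.map_cons, List.filterMap_cons, if_neg hcm,
        pvB_tail (c :: rest) codepoints hS hm hlen rest [] c rfl, hw]
      rfl
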